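-- pv_equiv track=rewrite | github.com/sundevilmotorsports/processing | SDM26/benji2_to_motec.py | filter_duplicate_headers
-- ===== SOURCE A (Python) =====
-- def filter_duplicate_headers(header_str: str) -> tuple[str, list[int]]:
--     """
--     Filter CSV header string and count occurrences of each base name
--
--     Args:
--         header_str: String containing comma-separated header names
--
--     Returns:
--         Tuple containing:
--             - Filtered header string with duplicates removed
--             - List of integers representing count of each base name
--
--     Example:
--         Input: "TS,TS1,TS2,TS3"
--         Output: ("TS", [4])
--     """
--     # Split headers and remove extra whitespace
--     headers = [h.strip() for h in header_str.split(',')]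
--     base_counts = {}
--     filtered = []
--
--     for header in headers:
--         header = header.strip('\x00')
--         base = header.rstrip('0123456789')
--         base = base.strip()
--         if base not in base_counts:
--             filtered.append(base)
--             base_counts[base] = 1
--         else:
--             base_counts[base] += 1
--
--     counts = [base_counts[base] for base in filtered]
--
--     return ','.join(filtered), counts
-- ===== SOURCE B (Python) =====
-- def filter_duplicate_headers(header_str: str) -> tuple[str, list[int]]:
--     bases = [h.strip().strip('\x00').rstrip('0123456789').strip()
--              for h in header_str.split(',')]
--
--     # Select-and-remove: repeatedly take the first remaining base, count it by how
--     # many elements filtering it out deletes, and continue on the remainder (no dict).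
--     names = []
--     counts = []
--     rest = bases
--     while rest:
--         b = rest[0]
--         keep = [x for x in rest if x != b]
--         names.append(b)
--         counts.append(len(rest) - len(keep))
--         rest = keep
--
--     return ','.join(names), counts
-- ===== Notes on version B (the rewrite author's own statement) =====
-- stated objective: alternative
-- what changed: A's single fused loop threading a count dict and an ordered list is replaced by a select-and-remove loop: clean all headers into a bases list, then repeatedly take the first remaining base, derive its count from how many elements filtering it out deletes, and continue on the filtered remainder (no dict or counting structure at all).
import Mathlib
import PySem

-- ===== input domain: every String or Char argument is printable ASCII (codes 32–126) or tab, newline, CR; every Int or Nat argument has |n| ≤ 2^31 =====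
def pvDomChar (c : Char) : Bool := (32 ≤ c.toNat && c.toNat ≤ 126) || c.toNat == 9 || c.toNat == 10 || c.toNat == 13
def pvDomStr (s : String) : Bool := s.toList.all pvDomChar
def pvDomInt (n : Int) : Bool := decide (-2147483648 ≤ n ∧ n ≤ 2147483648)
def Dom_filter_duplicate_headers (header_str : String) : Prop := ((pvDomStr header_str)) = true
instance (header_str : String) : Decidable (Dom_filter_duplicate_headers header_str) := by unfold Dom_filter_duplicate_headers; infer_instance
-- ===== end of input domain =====

-- B replaces A's fused dict+list loop by a select-and-remove recursion over the cleaned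
-- bases list (take first base, count it via the shrink of filtering it out, recurse);
-- objective: alternative (no counting structure), not faster.

-- ===== PORT A =====

-- Python's h.rstrip('0123456789'): drop trailing decimal-digit characters (hand port, exact:
-- the strip set is a fixed ASCII digit set, so membership is the digit test).
def pvRstripDigits (cs : List Char) : List Char :=
  (cs.reverse.dropWhile (fun c => decide ('0' ≤ c ∧ c ≤ '9'))).reverse

-- the loop body's cleaning chain: header.strip('\x00'); base = header.rstrip('0123456789'); base = base.strip()
def pvCleanA (header : List Char) : List Char :=
  PySem.Chars.strip (pvRstripDigits (PySem.Chars.stripChars header [Char.ofNat 0]))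

-- the for-loop of A, threading (base_counts, filtered)
def pvLoopA : List (List Char) → PySem.Dict (List Char) Int → List (List Char) →
    PySem.Dict (List Char) Int × List (List Char)
  | [], base_counts, filtered => (base_counts, filtered)
  | header :: rest, base_counts, filtered =>
      let base := pvCleanA header
      if base_counts.contains base then
        pvLoopA rest (base_counts.insert base (base_counts.getD base 0 + 1)) filtered
      else
        pvLoopA rest (base_counts.insert base 1) (filtered ++ [base])

def filter_duplicate_headers (header_str : String) : String × List Int :=
  let headers := (PySem.Chars.splitOn header_str.toList [',']).map PySem.Chars.strip
  let st := pvLoopA headers PySem.Dict.empty []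
  -- counts = [base_counts[base] for base in filtered]; every base in filtered is a key, getD 0 is exact
  let counts := st.2.map (fun base => st.1.getD base 0)
  (String.ofList (PySem.Chars.join [','] st.2), counts)

-- ===== PORT B =====

-- Source B's cleaning chain: h.strip().strip('\x00').rstrip('0123456789').strip()
def pvBaseB (h : List Char) : List Char :=
  PySem.Chars.strip (pvRstripDigits (PySem.Chars.stripChars (PySem.Chars.strip h) [Char.ofNat 0]))

-- Source B's while loop: select-and-remove with names/counts accumulators
def pvLoopB : List (List Char) → List (List Char) → List Int → List (List Char) × List Int
  | [], names, counts => (names, counts)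
  | b :: t, names, counts =>
      pvLoopB ((b :: t).filter (fun x => decide (x ≠ b))) (names ++ [b])
        (counts ++ [((b :: t).length : Int) - (((b :: t).filter (fun x => decide (x ≠ b))).length : Int)])
  termination_by rest => rest.length
  decreasing_by
    simp only [List.filter_cons]
    simp only [decide_not]
    simp [List.length_filter_le]

def filter_duplicate_headers_alt (header_str : String) : String × List Int :=
  let bases := (PySem.Chars.splitOn header_str.toList [',']).map pvBaseB
  let nc := pvLoopB bases [] []
  (String.ofList (PySem.Chars.join [','] nc.1), nc.2)

-- ===== PRECONDITION & SPEC =====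
def Spec_filter_duplicate_headers (header_str : String) (out : String × List Int) : Prop := out = filter_duplicate_headers_alt header_str
instance (header_str : String) (out : String × List Int) : Decidable (Spec_filter_duplicate_headers header_str out) := by unfold Spec_filter_duplicate_headers; infer_instance

-- ===== CLAIM (what is proved, stated in full; the proofs are below) =====
def Claim_equal_filter_duplicate_headers : Prop := ∀ (header_str : String), Dom_filter_duplicate_headers header_str → Spec_filter_duplicate_headers header_str (filter_duplicate_headers header_str)

-- ===== LEMMAS AND PROOFS =====

-- A's loop, characterised: the dict is the counting fold over the cleaned headers and
-- filtered is the ordered dedup (Set.update) of the cleaned headers, given keys = filtered.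
theorem pvLoopA_spec (l : List (List Char)) (d : PySem.Dict (List Char) Int)
    (f : List (List Char)) (hk : d.keys = f) :
    pvLoopA l d f =
      (List.foldl (fun d x => d.insert x (d.getD x 0 + 1)) d (l.map pvCleanA),
       PySem.Set.update f (l.map pvCleanA)) := by
  induction l generalizing d f with
  | nil => simp [pvLoopA, PySem.Set.update]
  | cons h t ih =>
    simp only [pvLoopA, List.map_cons, List.foldl_cons]
    by_cases hc : d.contains (pvCleanA h) = true
    · have hmem : pvCleanA h ∈ f := hk ▸ (PySem.Dict.contains_iff_mem_keys d _).mp hc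
      rw [if_pos hc]
      rw [ih _ _ (by rw [PySem.Dict.keys_insert_of_contains d _ hc, hk])]
      simp [PySem.Set.update, PySem.Set.add, hmem]
    · have hc' : d.contains (pvCleanA h) = false := by simpa using hc
      have hmem : pvCleanA h ∉ f := fun hm =>
        hc ((PySem.Dict.contains_iff_mem_keys d _).mpr (hk ▸ hm))
      rw [if_neg hc]
      have h0 : d.getD (pvCleanA h) 0 = 0 := PySem.Dict.getD_of_not_contains d _ hc'
      rw [ih _ _ (by rw [PySem.Dict.keys_insert_of_not_contains d _ hc', hk])]
      simp [PySem.Set.update, PySem.Set.add, hmem, h0]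

theorem pvBaseB_eq (h : List Char) : pvBaseB h = pvCleanA (PySem.Chars.strip h) := rfl

-- proof-side recursion without accumulators, equal to pvLoopB's loop (bridge below)
def pvGoB : List (List Char) → List (List Char) × List Int
  | [] => ([], [])
  | b :: t =>
      let keep := (b :: t).filter (fun x => decide (x ≠ b))
      let nc := pvGoB keep
      (b :: nc.1, (((b :: t).length : Int) - (keep.length : Int)) :: nc.2)
  termination_by rest => rest.length
  decreasing_by
    simp only [List.filter_cons]
    simp only [decide_not]
    simp [List.length_filter_le]

-- the accumulator loop is pvGoB appended to the accumulators
theorem pvLoopB_go : ∀ (n : Nat) (l : List (List Char)), l.length ≤ n →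
    ∀ (ns : List (List Char)) (cs : List Int),
    pvLoopB l ns cs = (ns ++ (pvGoB l).1, cs ++ (pvGoB l).2) := by
  intro n
  induction n with
  | zero =>
    intro l hl ns cs
    cases l with
    | nil => simp [pvLoopB, pvGoB]
    | cons b t => simp at hl
  | succ n ihn =>
    intro l hl ns cs
    cases l with
    | nil => simp [pvLoopB, pvGoB]
    | cons b t =>
      have hlen : ((b :: t).filter (fun x => decide (x ≠ b))).length ≤ n := by
      -- the filter drops the head, so it fits under t.length ≤ n
        have h2 : (b :: t).filter (fun x => decide (x ≠ b)) = t.filter (fun x => decide (x ≠ b)) := by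
          simp
        rw [h2]
        have := List.length_filter_le (fun x => decide (x ≠ b)) t
        simp only [List.length_cons] at hl
        omega
      simp only [pvLoopB, pvGoB]
      rw [ihn _ hlen]
      simp

-- Set.add on a cons whose head differs from the added element commutes with the cons
theorem set_add_cons (s : List (List Char)) (b x : List Char) (hxb : x ≠ b) :
    PySem.Set.add (b :: s) x = b :: PySem.Set.add s x := by
  simp [PySem.Set.add, PySem.Set.contains, hxb]
  split_ifs <;> simp_all

-- ordered dedup peels off its head: later occurrences of it can be filtered away
theorem set_update_cons_head (t : List (List Char)) : ∀ (s : List (List Char)) (b : List Char),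
    PySem.Set.update (b :: s) t = b :: PySem.Set.update s (t.filter (fun x => decide (x ≠ b))) := by
  induction t with
  | nil => intro s b; simp [PySem.Set.update]
  | cons x t ih =>
    intro s b
    by_cases hxb : x = b
    · subst hxb
      have hadd : PySem.Set.add (x :: s) x = x :: s := by
        simp [PySem.Set.add, PySem.Set.contains]
      simp only [PySem.Set.update, List.foldl_cons, List.filter_cons, decide_not, hadd]
      simpa [PySem.Set.update] using ih s x
    · have h1 : PySem.Set.update (b :: s) (x :: t) = PySem.Set.update (b :: PySem.Set.add s x) t := by
        simp [PySem.Set.update, set_add_cons s b x hxb]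
      have h2 : (x :: t).filter (fun y => decide (y ≠ b)) = x :: t.filter (fun y => decide (y ≠ b)) := by
        simp [hxb]
      rw [h1, h2, ih (PySem.Set.add s x) b]
      simp [PySem.Set.update]

-- B's recursion, characterised: names = ordered dedup, counts = occurrence counts
theorem pvGoB_spec (l : List (List Char)) :
    pvGoB l = (PySem.Set.update [] l,
               (PySem.Set.update [] l).map (fun b => (l.count b : Int))) := by
  fun_induction pvGoB l with
  | case1 => simp [PySem.Set.update]
  | case2 b t keep nc ih =>
    simp only [keep, nc] at ih ⊢
    have hkeep : (b :: t).filter (fun x => decide (x ≠ b)) = t.filter (fun x => decide (x ≠ b)) := by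
      simp
    have hupd : PySem.Set.update ([] : List (List Char)) (b :: t)
        = b :: PySem.Set.update [] (t.filter (fun x => decide (x ≠ b))) := by
      have := set_update_cons_head t [] b
      simpa [PySem.Set.update, PySem.Set.add, PySem.Set.contains] using this
    have hlen : ((b :: t).length : Int)
        - (((b :: t).filter (fun x => decide (x ≠ b))).length : Int)
        = ((b :: t).count b : Int) := by
      rw [hkeep]
      have key : ∀ (u : List (List Char)),
          (u.filter (fun x => !decide (x = b))).length + u.count b = u.length := by
        intro u
        induction u with
        | nil => simp
        | cons y u ihu =>
          by_cases h : y = b <;>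
            simp [List.filter_cons, List.count_cons, h, ihu] <;> omega
      have := key t
      simp only [List.count_cons, List.length_cons, beq_self_eq_true, if_pos]
      simp only [decide_not] at this ⊢
      push_cast
      omega
    rw [hkeep] at ih
    simp only [decide_not] at hkeep hupd hlen ih ⊢
    simp only [hkeep, ih, hupd, List.map_cons]
    refine Prod.ext rfl ?_
    refine List.cons_eq_cons.mpr ⟨by simpa using hlen, ?_⟩
    apply List.map_congr_left
    intro x hx
    have hxk : x ∈ t.filter (fun y => !decide (y = b)) :=
      (PySem.Set.mem_ofList _ _).mp hx
    have hxb : x ≠ b := by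
      have := List.of_mem_filter hxk
      simpa using this
    simp [List.count_filter, hxb, Ne.symm hxb]

-- ===== VERDICT (by name: the statement is the Claim_ definition above) =====
set_option maxHeartbeats 1000000 in
theorem filter_duplicate_headers_spec : Claim_equal_filter_duplicate_headers := by
  intro s _
  show (String.ofList (PySem.Chars.join [',']
          (pvLoopA ((PySem.Chars.splitOn s.toList [',']).map PySem.Chars.strip) PySem.Dict.empty []).2),
        (pvLoopA ((PySem.Chars.splitOn s.toList [',']).map PySem.Chars.strip) PySem.Dict.empty []).2.map
          (fun base => (pvLoopA ((PySem.Chars.splitOn s.toList [',']).map PySem.Chars.strip) PySem.Dict.empty []).1.getD base 0))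
      = (String.ofList (PySem.Chars.join [','] (pvLoopB ((PySem.Chars.splitOn s.toList [',']).map pvBaseB) [] []).1),
         (pvLoopB ((PySem.Chars.splitOn s.toList [',']).map pvBaseB) [] []).2)
  have hgo : pvLoopB ((PySem.Chars.splitOn s.toList [',']).map pvBaseB) [] []
      = pvGoB ((PySem.Chars.splitOn s.toList [',']).map pvBaseB) := by
    simpa using pvLoopB_go _ _ (le_refl _) [] []
  rw [hgo]
  have hb : (PySem.Chars.splitOn s.toList [',']).map pvBaseB
      = ((PySem.Chars.splitOn s.toList [',']).map PySem.Chars.strip).map pvCleanA := by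
    simp [List.map_map, Function.comp, pvBaseB_eq]
  rw [pvLoopA_spec _ _ _ (by simp), hb, pvGoB_spec]
  refine Prod.ext rfl ?_
  simp only [List.map_inj_left]
  intro b _
  rw [PySem.Dict.getD_foldl_insert_add_one]
  simp [PySem.Dict.getD_empty]
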